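-- pv_equiv track=rewrite | github.com/Racconkek/Crossword | Parser.py | parse_from_gui
-- ===== SOURCE A (Python) =====
-- import copy
--
-- def parse_from_gui(geometry):
--     result = copy.deepcopy(geometry)
--     for i in range(len(geometry)):
--         for j in range(len(geometry[0])):
--             if geometry[i][j] == '*':
--                 if j != len(geometry[0]) - 1 and geometry[i][j + 1] == '*':
--                     result[i][j] = '0'
--                 if j != 0 and geometry[i][j - 1] == '*':
--                     result[i][j] = '0'
--
--     for i in range(len(result[0])):
--         for j in range(len(result)):
--             if result[j][i] == '0':
--                 if j != 0 and result[j - 1][i] == '1':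
--                     result[j][i] = '2'
--                 if j != len(geometry) - 1 and geometry[j + 1][i] == '*':
--                     result[j][i] = '2'
--             elif geometry[j][i] == '*':
--                 if j != 0 and geometry[j - 1][i] == '*':
--                     result[j][i] = '1'
--                 elif j!= len(geometry) - 1 and geometry[j + 1][i] == '*':
--                     result[j][i] = '1'
--     return result
-- ===== SOURCE B (Python) =====
-- def parse_from_gui(geometry):
--     R = len(geometry)
--     C = len(geometry[0])  # grid width, taken from the first row
--
--     def horiz(r, c):
--         # '*' cell with a horizontal '*' neighbour
--         return geometry[r][c] == '*' and ((c + 1 < C and geometry[r][c + 1] == '*')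
--                                           or (c > 0 and geometry[r][c - 1] == '*'))
--
--     def vert(r, c):
--         return (r > 0 and geometry[r - 1][c] == '*') or (r + 1 < R and geometry[r + 1][c] == '*')
--
--     def is_one(r, c):
--         ch = geometry[r][c]
--         return ch == '1' or (ch == '*' and not horiz(r, c) and vert(r, c))
--
--     def cell(r, c):
--         ch = geometry[r][c]
--         if ch == '0' or horiz(r, c):
--             return '2' if (r > 0 and is_one(r - 1, c)) or (r + 1 < R and geometry[r + 1][c] == '*') else '0'
--         if ch == '*':
--             return '1' if vert(r, c) else '*'
--         return ch
--
--     result = []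
--     for r, row in enumerate(geometry):
--         new_row = list(row)
--         for c in range(C):
--             new_row[c] = cell(r, c)
--         result.append(new_row)
--     return result
-- ===== Notes on version B (the rewrite author's own statement) =====
-- stated objective: alternative
-- what changed: Replaces the two sequential in-place mutation passes (row-major marking then column-major propagation whose reads depend on cells already overwritten) by a single row-by-row pass that recomputes every cell directly from the original geometry via closed predicates horiz/vert/is_one; Pre_ excludes only inputs where A raises IndexError (the empty grid and grids with a row shorter than the first row).
import Mathlib
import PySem

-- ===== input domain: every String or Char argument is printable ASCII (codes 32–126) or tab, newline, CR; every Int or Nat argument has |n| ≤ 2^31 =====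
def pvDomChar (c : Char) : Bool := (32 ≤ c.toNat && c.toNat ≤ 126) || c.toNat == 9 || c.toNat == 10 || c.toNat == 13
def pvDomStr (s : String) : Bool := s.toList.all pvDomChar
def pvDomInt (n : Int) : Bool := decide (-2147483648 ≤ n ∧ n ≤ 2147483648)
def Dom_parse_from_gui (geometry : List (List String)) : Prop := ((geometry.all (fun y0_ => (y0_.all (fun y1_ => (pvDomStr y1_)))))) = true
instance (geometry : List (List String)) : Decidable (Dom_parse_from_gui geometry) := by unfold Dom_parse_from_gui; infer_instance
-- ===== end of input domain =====

-- B replaces A's two sequential in-place mutation passes by one row-by-row pass that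
-- recomputes every cell directly from the original geometry (alternative decomposition,
-- same cost). A mutates only its local deepcopy, never the argument; the theorems are
-- about return values.

-- shared low-level grid access: m[i][j] read / write with Nat indices (in range under Pre_)
def pvGet2 (m : List (List String)) (i j : Nat) : String := (m.getD i []).getD j ""
def pvSet2 (m : List (List String)) (i j : Nat) (v : String) : List (List String) :=
  m.set i ((m.getD i []).set j v)

-- ===== PORT A =====
-- the body of the inner `for j in range(len(geometry[0]))` loop of A's first pass
def pass1Inner (g : List (List String)) (C i : Nat) (res : List (List String)) (j : Nat) :
    List (List String) :=
  if pvGet2 g i j = "*" then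
    let res := if j ≠ C - 1 ∧ pvGet2 g i (j+1) = "*" then pvSet2 res i j "0" else res
    if j ≠ 0 ∧ pvGet2 g i (j-1) = "*" then pvSet2 res i j "0" else res
  else res

-- the body of the outer `for i in range(len(geometry))` loop of A's first pass
def pass1Row (g : List (List String)) (C : Nat) (res : List (List String)) (i : Nat) :
    List (List String) :=
  (List.range C).foldl (pass1Inner g C i) res

-- the body of the inner `for j in range(len(result))` loop of A's second pass
def pass2Cell (g : List (List String)) (R i : Nat) (res : List (List String)) (j : Nat) :
    List (List String) :=
  if pvGet2 res j i = "0" then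
    let res := if j ≠ 0 ∧ pvGet2 res (j-1) i = "1" then pvSet2 res j i "2" else res
    if j ≠ R - 1 ∧ pvGet2 g (j+1) i = "*" then pvSet2 res j i "2" else res
  else if pvGet2 g j i = "*" then
    if j ≠ 0 ∧ pvGet2 g (j-1) i = "*" then pvSet2 res j i "1"
    else if j ≠ R - 1 ∧ pvGet2 g (j+1) i = "*" then pvSet2 res j i "1"
    else res
  else res

-- the body of the outer `for i in range(len(result[0]))` loop of A's second pass
def pass2Col (g : List (List String)) (R : Nat) (res : List (List String)) (i : Nat) :
    List (List String) :=
  (List.range res.length).foldl (pass2Cell g R i) res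

def parse_from_gui (geometry : List (List String)) : List (List String) :=
  let R := geometry.length
  let C := (geometry.headD []).length
  let result := (List.range R).foldl (pass1Row geometry C) geometry
  (List.range ((result.headD []).length)).foldl (pass2Col geometry R) result

-- ===== PORT B =====
def altHoriz (g : List (List String)) (C r c : Nat) : Bool :=
  pvGet2 g r c == "*" &&
    ((c + 1 < C && pvGet2 g r (c+1) == "*") || (0 < c && pvGet2 g r (c-1) == "*"))

def altVert (g : List (List String)) (R r c : Nat) : Bool :=
  (0 < r && pvGet2 g (r-1) c == "*") || (r + 1 < R && pvGet2 g (r+1) c == "*")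

def altIsOne (g : List (List String)) (R C r c : Nat) : Bool :=
  pvGet2 g r c == "1" || (pvGet2 g r c == "*" && !altHoriz g C r c && altVert g R r c)

def altCell (g : List (List String)) (R C r c : Nat) : String :=
  let ch := pvGet2 g r c
  if ch == "0" || altHoriz g C r c then
    if (0 < r && altIsOne g R C (r-1) c) || (r + 1 < R && pvGet2 g (r+1) c == "*") then "2" else "0"
  else if ch == "*" then (if altVert g R r c then "1" else "*")
  else ch

-- `new_row = list(row); for c in range(C): new_row[c] = cell(r, c)`
def altRow (g : List (List String)) (R C r : Nat) : List String :=
  (List.range C).foldl (fun row c => row.set c (altCell g R C r c)) (g.getD r [])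

-- `for r, row in enumerate(geometry): … result.append(new_row)`
def parse_from_gui_alt (geometry : List (List String)) : List (List String) :=
  let R := geometry.length
  let C := (geometry.headD []).length
  (List.range R).foldl (fun res r => res ++ [altRow geometry R C r]) []

-- ===== PRECONDITION & SPEC =====
-- Pre_ excludes exactly the inputs where A raises IndexError: the empty grid (result[0] in the
-- second loop) and grids with a row shorter than the first row (geometry[i][j] for j < len(geometry[0])).
def Pre_parse_from_gui (geometry : List (List String)) : Prop :=
  geometry ≠ [] ∧ ∀ row ∈ geometry, (geometry.headD []).length ≤ row.length
instance (geometry : List (List String)) : Decidable (Pre_parse_from_gui geometry) := by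
  unfold Pre_parse_from_gui; infer_instance

def pvWitness_parse_from_gui : List (List String) :=
  [["*", "*", "."], ["*", ".", "*"], ["*", "1", "*"]]

def Spec_parse_from_gui (geometry : List (List String)) (out : List (List String)) : Prop := out = parse_from_gui_alt geometry
instance (geometry : List (List String)) (out : List (List String)) : Decidable (Spec_parse_from_gui geometry out) := by unfold Spec_parse_from_gui; infer_instance

-- ===== CLAIM (what is proved, stated in full; the proofs are below) =====
def Claim_equal_parse_from_gui : Prop := ∀ (geometry : List (List String)), Dom_parse_from_gui geometry → Pre_parse_from_gui geometry → Spec_parse_from_gui geometry (parse_from_gui geometry)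

-- ===== LEMMAS AND PROOFS =====

theorem getD_set {α : Type} (l : List α) (i j : Nat) (a d : α) :
    (l.set i a).getD j d = if i = j ∧ i < l.length then a else l.getD j d := by
  simp [List.getD_eq_getElem?_getD, List.getElem?_set]
  split_ifs with h1 h2 h3 <;> simp_all
  omega

-- `Eqv g res F`: res has g's shape and its cells (read through pvGet2) are described by F
def Eqv (g res : List (List String)) (F : Nat → Nat → String) : Prop :=
  res.length = g.length ∧ (∀ r, (res.getD r []).length = (g.getD r []).length) ∧
    (∀ r c, pvGet2 res r c = F r c)

theorem Eqv_congr {g res : List (List String)} {F F' : Nat → Nat → String}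
    (h : Eqv g res F) (hFF : ∀ r c, F r c = F' r c) : Eqv g res F' :=
  ⟨h.1, h.2.1, fun r c => (h.2.2 r c).trans (hFF r c)⟩

theorem Eqv_set {g res : List (List String)} {F : Nat → Nat → String}
    (h : Eqv g res F) (r0 c0 : Nat) (hr : r0 < g.length) (hc : c0 < (g.getD r0 []).length)
    (v : String) :
    Eqv g (pvSet2 res r0 c0 v) (fun r c => if r = r0 ∧ c = c0 then v else F r c) := by
  obtain ⟨hlen, hrow, hget⟩ := h
  have hr' : r0 < res.length := by omega
  have hc' : c0 < (res.getD r0 []).length := by rw [hrow]; exact hc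
  refine ⟨by simp [pvSet2, hlen], ?_, ?_⟩
  · intro r
    rw [pvSet2, getD_set]
    split_ifs with hif
    · rw [← hif.1, List.length_set]; exact hrow r0
    · exact hrow r
  · intro r c
    rw [pvGet2, pvSet2, getD_set]
    split_ifs with hif
    · obtain ⟨he, _⟩ := hif
      subst he
      rw [getD_set]
      split_ifs with hif2
      · simp [hif2.1]
      · have hne : c ≠ c0 := fun hcon => hif2 ⟨hcon.symm, hc'⟩
        simp only [hne, and_false, if_false]
        exact hget r0 c
    · have hne : r ≠ r0 := fun hcon => hif ⟨hcon.symm, hcon ▸ hr'⟩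
      simp only [hne, false_and, if_false]
      exact hget r c

theorem altHoriz_iff (g : List (List String)) (C i j : Nat) (hj : j < C) :
    altHoriz g C i j = true ↔
      pvGet2 g i j = "*" ∧
        ((j ≠ C - 1 ∧ pvGet2 g i (j+1) = "*") ∨ (j ≠ 0 ∧ pvGet2 g i (j-1) = "*")) := by
  simp [altHoriz]
  intro _
  constructor
  · rintro (⟨h3, h4⟩ | ⟨h3, h4⟩)
    · exact Or.inl ⟨by omega, h4⟩
    · exact Or.inr ⟨by omega, h4⟩
  · rintro (⟨h3, h4⟩ | ⟨h3, h4⟩)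
    · exact Or.inl ⟨by omega, h4⟩
    · exact Or.inr ⟨by omega, h4⟩

theorem pass1Inner_eqv {g res : List (List String)} {F : Nat → Nat → String} {C i j : Nat}
    (h : Eqv g res F) (hi : i < g.length) (hjC : j < C) (hjr : j < (g.getD i []).length) :
    Eqv g (pass1Inner g C i res j)
      (fun r c => if r = i ∧ c = j ∧ altHoriz g C i j = true then "0" else F r c) := by
  have hH := altHoriz_iff g C i j hjC
  simp only [pass1Inner]
  split_ifs with hstar h2 h3 h3
  · have hHt : altHoriz g C i j = true := hH.mpr ⟨hstar, Or.inr h2⟩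
    have e2 := Eqv_set (Eqv_set h i j hi hjr "0") i j hi hjr "0"
    refine Eqv_congr e2 (fun r c => ?_)
    by_cases hrc : r = i ∧ c = j <;> simp [hrc, hHt]
  · have hHt : altHoriz g C i j = true := hH.mpr ⟨hstar, Or.inr h2⟩
    have e1 := Eqv_set h i j hi hjr "0"
    refine Eqv_congr e1 (fun r c => ?_)
    by_cases hrc : r = i ∧ c = j <;> simp [hrc, hHt]
  · have hHt : altHoriz g C i j = true := hH.mpr ⟨hstar, Or.inl h3⟩
    have e1 := Eqv_set h i j hi hjr "0"
    refine Eqv_congr e1 (fun r c => ?_)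
    by_cases hrc : r = i ∧ c = j <;> simp [hrc, hHt]
  · have hHf : ¬ (altHoriz g C i j = true) := by
      rw [hH]; rintro ⟨_, hd | hd⟩
      · exact h3 hd
      · exact h2 hd
    refine Eqv_congr h (fun r c => ?_)
    simp [hHf]
  · have hHf : ¬ (altHoriz g C i j = true) := by
      rw [hH]; rintro ⟨hs, _⟩
      exact hstar hs
    refine Eqv_congr h (fun r c => ?_)
    simp [hHf]

theorem pass1Row_eqv {g res : List (List String)} {F : Nat → Nat → String} {C i : Nat}
    (h : Eqv g res F) (hi : i < g.length) (hrow : C ≤ (g.getD i []).length) :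
    Eqv g (pass1Row g C res i)
      (fun r c => if r = i ∧ c < C ∧ altHoriz g C r c = true then "0" else F r c) := by
  have aux : ∀ k, k ≤ C → Eqv g ((List.range k).foldl (pass1Inner g C i) res)
      (fun r c => if r = i ∧ c < k ∧ altHoriz g C r c = true then "0" else F r c) := by
    intro k
    induction k with
    | zero => intro _; exact Eqv_congr h (fun r c => by simp)
    | succ k ih =>
      intro hk
      rw [List.range_succ, List.foldl_append, List.foldl_cons, List.foldl_nil]
      have hkC : k < C := hk
      have e := pass1Inner_eqv (ih (le_of_lt hkC)) hi hkC (lt_of_lt_of_le hkC hrow)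
      refine Eqv_congr e (fun r c => ?_)
      by_cases hri : r = i
      · subst hri
        by_cases hck : c = k
        · subst hck
          by_cases hH : altHoriz g C r c = true <;> simp [hH]
        · have hlt : (c < k) ↔ (c < k + 1) := by omega
          simp [hck, hlt]
      · simp [hri]
  exact aux C le_rfl

theorem pass1_eqv {g : List (List String)} {C : Nat}
    (hrow : ∀ i < g.length, C ≤ (g.getD i []).length) :
    Eqv g ((List.range g.length).foldl (pass1Row g C) g)
      (fun r c => if r < g.length ∧ c < C ∧ altHoriz g C r c = true then "0" else pvGet2 g r c) := by
  have aux : ∀ k, k ≤ g.length → Eqv g ((List.range k).foldl (pass1Row g C) g)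
      (fun r c => if r < k ∧ c < C ∧ altHoriz g C r c = true then "0" else pvGet2 g r c) := by
    intro k
    induction k with
    | zero =>
      intro _
      exact Eqv_congr ⟨rfl, fun _ => rfl, fun _ _ => rfl⟩ (fun r c => by simp)
    | succ k ih =>
      intro hk
      rw [List.range_succ, List.foldl_append, List.foldl_cons, List.foldl_nil]
      have hkR : k < g.length := hk
      have e := pass1Row_eqv (ih (le_of_lt hkR)) hkR (hrow k hkR)
      refine Eqv_congr e (fun r c => ?_)
      by_cases hrk : r = k
      · subst hrk
        by_cases hcH : c < C ∧ altHoriz g C r c = true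
        · simp [hcH.1, hcH.2]
        · simp [hcH]
      · have hlt : (r < k) ↔ (r < k + 1) := by omega
        simp [hrk, hlt]
  exact aux g.length le_rfl

theorem altCell_eq_one (g : List (List String)) (R C r c : Nat) :
    (altCell g R C r c = "1") ↔ altIsOne g R C r c = true := by
  have hHs : altHoriz g C r c = true → pvGet2 g r c = "*" := by
    simp [altHoriz]; tauto
  simp only [altCell, altIsOne]
  split_ifs with h1 h2 h3 <;> simp_all <;>
    (rcases h1 with h0 | hh
     · simp [h0]
     · simp [hHs hh, hh])

theorem pass2Cell_eqv {g res : List (List String)} {F : Nat → Nat → String} {C i j : Nat}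
    (h : Eqv g res F) (hj : j < g.length)
    (hjr : i < (g.getD j []).length)
    (hcur : F j i = if altHoriz g C j i = true then "0" else pvGet2 g j i)
    (hup : 0 < j → F (j-1) i = altCell g g.length C (j-1) i) :
    Eqv g (pass2Cell g g.length i res j)
      (fun r c => if r = j ∧ c = i then altCell g g.length C j i else F r c) := by
  obtain ⟨hlen, hrowlen, hget⟩ := h
  have h' : Eqv g res F := ⟨hlen, hrowlen, hget⟩
  have hone : ∀ _ : 0 < j,
      ((F (j-1) i = "1") ↔ altIsOne g g.length C (j-1) i = true) := by
    intro hz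
    rw [hup hz]
    exact altCell_eq_one g g.length C (j-1) i
  simp only [pass2Cell, hget]
  by_cases hz : F j i = "0"
  · rw [if_pos hz]
    have hzc : pvGet2 g j i = "0" ∨ altHoriz g C j i = true := by
      by_cases hH : altHoriz g C j i = true
      · exact Or.inr hH
      · rw [hcur, if_neg hH] at hz; exact Or.inl hz
    have hKdef : altCell g g.length C j i =
        if (0 < j && altIsOne g g.length C (j-1) i)
            || (j + 1 < g.length && (pvGet2 g (j+1) i == "*")) then "2" else "0" := by
      rcases hzc with h0 | hH
      · simp [altCell, h0]
      · simp [altCell, hH]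
    split_ifs with hb ha ha
    · have hK : altCell g g.length C j i = "2" := by
        rw [hKdef]
        simp [Nat.pos_of_ne_zero ha.1, (hone (Nat.pos_of_ne_zero ha.1)).mp ha.2]
      refine Eqv_congr (Eqv_set (Eqv_set h' j i hj hjr "2") j i hj hjr "2") (fun r c => ?_)
      by_cases hrc : r = j ∧ c = i <;> simp [hrc, hK]
    · have hK : altCell g g.length C j i = "2" := by
        rw [hKdef]
        simp [show j + 1 < g.length by omega, hb.2]
      refine Eqv_congr (Eqv_set h' j i hj hjr "2") (fun r c => ?_)
      by_cases hrc : r = j ∧ c = i <;> simp [hrc, hK]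
    · have hK : altCell g g.length C j i = "2" := by
        rw [hKdef]
        simp [Nat.pos_of_ne_zero ha.1, (hone (Nat.pos_of_ne_zero ha.1)).mp ha.2]
      refine Eqv_congr (Eqv_set h' j i hj hjr "2") (fun r c => ?_)
      by_cases hrc : r = j ∧ c = i <;> simp [hrc, hK]
    · have hK : altCell g g.length C j i = "0" := by
        rw [hKdef]
        have hL : ¬ (0 < j ∧ altIsOne g g.length C (j-1) i = true) := by
          rintro ⟨h0j, hio⟩
          exact ha ⟨by omega, (hone h0j).mpr hio⟩
        have hR : ¬ (j + 1 < g.length ∧ pvGet2 g (j+1) i = "*") := by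
          rintro ⟨h1j, hbl⟩
          exact hb ⟨by omega, hbl⟩
        simp only [Bool.or_eq_true, Bool.and_eq_true, decide_eq_true_eq, beq_iff_eq] at *
        rw [if_neg (by tauto)]
      refine Eqv_congr h' (fun r c => ?_)
      by_cases hrc : r = j ∧ c = i
      · simp [hrc, hK, ← hz]
      · simp [hrc]
  · rw [if_neg hz]
    have hH : altHoriz g C j i = false := by
      by_cases hH' : altHoriz g C j i = true
      · exact absurd (hcur.trans (if_pos hH')) hz
      · simp only [Bool.not_eq_true] at hH'; exact hH'
    have hFg : F j i = pvGet2 g j i := by rw [hcur, hH]; simp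
    split_ifs with hstar h3a h3b
    · have hK : altCell g g.length C j i = "1" := by
        simp [altCell, hstar, hH, altVert, Nat.pos_of_ne_zero h3a.1, h3a.2]
      refine Eqv_congr (Eqv_set h' j i hj hjr "1") (fun r c => ?_)
      by_cases hrc : r = j ∧ c = i <;> simp [hrc, hK]
    · have hK : altCell g g.length C j i = "1" := by
        simp [altCell, hstar, hH, altVert, show j + 1 < g.length by omega, h3b.2]
      refine Eqv_congr (Eqv_set h' j i hj hjr "1") (fun r c => ?_)
      by_cases hrc : r = j ∧ c = i <;> simp [hrc, hK]
    · have hK : altCell g g.length C j i = "*" := by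
        have hVL : ¬ (0 < j ∧ pvGet2 g (j-1) i = "*") := by
          rintro ⟨h0j, hab⟩
          exact h3a ⟨by omega, hab⟩
        have hVR : ¬ (j + 1 < g.length ∧ pvGet2 g (j+1) i = "*") := by
          rintro ⟨h1j, hbl⟩
          exact h3b ⟨by omega, hbl⟩
        have hV : altVert g g.length j i = false := by
          simp only [altVert, Bool.or_eq_false_iff, Bool.and_eq_false_iff]
          constructor
          · by_cases h0j : 0 < j
            · exact Or.inr (by simp; intro hc; exact absurd ⟨h0j, hc⟩ hVL)
            · exact Or.inl (by simp; omega)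
          · by_cases h1j : j + 1 < g.length
            · exact Or.inr (by simp; intro hc; exact absurd ⟨h1j, hc⟩ hVR)
            · exact Or.inl (by simp; omega)
        simp [altCell, hstar, hH, hV]
      refine Eqv_congr h' (fun r c => ?_)
      by_cases hrc : r = j ∧ c = i
      · simp [hrc.1, hrc.2, hK, ← hstar, ← hFg]
      · simp [hrc]
    · have hzero : pvGet2 g j i ≠ "0" := by
        intro hc; exact hz (hFg.trans hc)
      have hK : altCell g g.length C j i = pvGet2 g j i := by
        simp [altCell, hstar, hH, hzero]
      refine Eqv_congr h' (fun r c => ?_)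
      by_cases hrc : r = j ∧ c = i
      · simp [hrc.1, hrc.2, hK, ← hFg]
      · simp [hrc]

theorem pass2Col_eqv {g res : List (List String)} {F : Nat → Nat → String} {C i : Nat}
    (h : Eqv g res F) (hiC : i < C)
    (hrow : ∀ r < g.length, C ≤ (g.getD r []).length)
    (hcol : ∀ r, F r i = if r < g.length ∧ altHoriz g C r i = true then "0" else pvGet2 g r i) :
    Eqv g (pass2Col g g.length res i)
      (fun r c => if r < g.length ∧ c = i then altCell g g.length C r c else F r c) := by
  have aux : ∀ m, m ≤ g.length → Eqv g ((List.range m).foldl (pass2Cell g g.length i) res)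
      (fun r c => if r < m ∧ c = i then altCell g g.length C r c else F r c) := by
    intro m
    induction m with
    | zero => intro _; exact Eqv_congr h (fun r c => by simp)
    | succ m ih =>
      intro hm
      rw [List.range_succ, List.foldl_append, List.foldl_cons, List.foldl_nil]
      have hmR : m < g.length := hm
      have e := pass2Cell_eqv (C := C) (ih (le_of_lt hmR)) hmR
        (lt_of_lt_of_le hiC (hrow m hmR)) ?_ ?_
      · refine Eqv_congr e (fun r c => ?_)
        by_cases hci : c = i
        · by_cases hrm : r = m
          · simp [hci, hrm]
          · have hlt : (r < m) ↔ (r < m + 1) := by omega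
            simp [hci, hrm, hlt]
        · simp [hci]
      · have hmm : ¬ (m < m) := by omega
        simp only [hmm, false_and, if_false]
        rw [hcol m]
        simp [hmR]
      · intro h0m
        have hlt : m - 1 < m := by omega
        simp [hlt]
  have hres : res.length = g.length := h.1
  rw [pass2Col, hres]
  exact aux g.length le_rfl

theorem pass2_eqv {g res : List (List String)} {C : Nat}
    (hrow : ∀ r < g.length, C ≤ (g.getD r []).length)
    (h : Eqv g res (fun r c => if r < g.length ∧ c < C ∧ altHoriz g C r c = true then "0" else pvGet2 g r c)) :
    Eqv g ((List.range C).foldl (pass2Col g g.length) res)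
      (fun r c => if r < g.length ∧ c < C then altCell g g.length C r c else pvGet2 g r c) := by
  have aux : ∀ k, k ≤ C →
      Eqv g ((List.range k).foldl (pass2Col g g.length) res)
        (fun r c => if c < k ∧ r < g.length then altCell g g.length C r c
          else if r < g.length ∧ c < C ∧ altHoriz g C r c = true then "0" else pvGet2 g r c) := by
    intro k
    induction k with
    | zero => intro _; exact Eqv_congr h (fun r c => by simp)
    | succ k ih =>
      intro hk
      rw [List.range_succ, List.foldl_append, List.foldl_cons, List.foldl_nil]
      have hkC : k < C := hk
      have e := pass2Col_eqv (ih (le_of_lt hkC)) hkC hrow ?_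
      · refine Eqv_congr e (fun r c => ?_)
        by_cases hrR : r < g.length
        · by_cases hck : c = k
          · simp [hck, hrR]
          · have hlt : (c < k) ↔ (c < k + 1) := by omega
            simp [hck, hlt]
        · simp [hrR]
      · intro r
        have hkk : ¬ (k < k) := by omega
        simp only [hkk, false_and, if_false]
        by_cases hrR : r < g.length
        · simp [hrR, hkC]
        · simp [hrR]
  have hfin := aux C le_rfl
  refine Eqv_congr hfin (fun r c => ?_)
  by_cases hrc : r < g.length ∧ c < C
  · simp [hrc.1, hrc.2]
  · have : ¬ (c < C ∧ r < g.length) := by tauto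
    simp only [this, hrc, if_false]
    by_cases hr : r < g.length
    · have hc : ¬ (c < C) := by tauto
      simp [hc]
    · simp [hr]

-- B's inner loop: after writing cells 0..C-1 of the copied row, the row is the freshly
-- computed prefix followed by the untouched suffix
theorem foldl_set_range (f : Nat → String) (row : List String) (C : Nat) (h : C ≤ row.length) :
    (List.range C).foldl (fun acc c => acc.set c (f c)) row
      = (List.range C).map f ++ row.drop C := by
  induction C with
  | zero => simp
  | succ k ih =>
    rw [List.range_succ, List.foldl_append, List.foldl_cons, List.foldl_nil,
        ih (by omega)]
    have hklt : k < row.length := by omega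
    have hdrop : row.drop k = row[k] :: row.drop (k+1) := List.drop_eq_getElem_cons hklt
    rw [List.set_append]
    simp only [List.length_map, List.length_range, Nat.lt_irrefl, if_false, Nat.sub_self]
    rw [hdrop, List.set_cons_zero]
    simp

-- B's outer loop is a map over row indices
theorem foldl_append_singleton {α β : Type} (f : α → β) (l : List α) (init : List β) :
    l.foldl (fun res r => res ++ [f r]) init = init ++ l.map f := by
  induction l generalizing init with
  | nil => simp
  | cons x xs ih => simp [List.foldl_cons, ih, List.append_assoc]

theorem alt_eqv {g : List (List String)}
    (hrow : ∀ r < g.length, (g.headD []).length ≤ (g.getD r []).length) :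
    Eqv g (parse_from_gui_alt g)
      (fun r c => if r < g.length ∧ c < (g.headD []).length then altCell g g.length (g.headD []).length r c else pvGet2 g r c) := by
  obtain ⟨C, hCdef⟩ : ∃ C, (g.headD []).length = C := ⟨_, rfl⟩
  rw [hCdef] at hrow ⊢
  have hhd : (g.head?.getD []).length = C := by rw [← hCdef]; cases g <;> rfl
  have halt : parse_from_gui_alt g = (List.range g.length).map (fun r => altRow g g.length C r) := by
    simp only [parse_from_gui_alt]
    rw [hCdef, foldl_append_singleton, List.nil_append]
  have hrowval : ∀ r, r < g.length →
      (parse_from_gui_alt g).getD r [] =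
        ((List.range C).map (fun c => altCell g g.length C r c)) ++ (g.getD r []).drop C := by
    intro r hr
    rw [halt, List.getD_eq_getElem?_getD, List.getElem?_map]
    have hsome : (List.range g.length)[r]? = some r := by simp [hr]
    rw [hsome]
    simp only [Option.map_some, Option.getD_some]
    rw [altRow, foldl_set_range _ _ _ (hrow r hr)]
  have hlen : (parse_from_gui_alt g).length = g.length := by rw [halt]; simp
  refine ⟨hlen, ?_, ?_⟩
  · intro r
    by_cases hr : r < g.length
    · rw [hrowval r hr]
      simp only [List.length_append, List.length_map, List.length_range, List.length_drop]
      have := hrow r hr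
      omega
    · rw [List.getD_eq_default _ _ (by omega), List.getD_eq_default _ _ (by omega)]
  · intro r c
    by_cases hr : r < g.length
    · rw [pvGet2, hrowval r hr]
      by_cases hc : c < C
      · rw [List.getD_eq_getElem?_getD,
          List.getElem?_append_left (by simp only [List.length_map, List.length_range]; omega)]
        simp [hc, hr]
      · rw [List.getD_eq_getElem?_getD,
          List.getElem?_append_right (by simp only [List.length_map, List.length_range]; omega)]
        simp only [List.length_map, List.length_range, List.getElem?_drop]
        rw [show C + (c - C) = c by omega]
        simp [hc, pvGet2, List.getD_eq_getElem?_getD]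
    · rw [pvGet2,
        show (parse_from_gui_alt g).getD r [] = [] from List.getD_eq_default _ _ (by omega)]
      have hg : (g.getD r []) = [] := List.getD_eq_default _ _ (by omega)
      simp [hr, pvGet2]

theorem eq_of_eqv {g m m' : List (List String)} {F : Nat → Nat → String}
    (h : Eqv g m F) (h' : Eqv g m' F) : m = m' := by
  obtain ⟨hl, hrl, hg⟩ := h
  obtain ⟨hl', hrl', hg'⟩ := h'
  apply List.ext_getElem (by omega)
  intro r hr hr'
  have hrow : m[r] = m.getD r [] := (List.getD_eq_getElem m [] hr).symm
  have hrow' : m'[r] = m'.getD r [] := (List.getD_eq_getElem m' [] hr').symm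
  rw [hrow, hrow']
  apply List.ext_getElem (by rw [hrl, hrl'])
  intro c hc hc'
  have e1 : (m.getD r [])[c] = pvGet2 m r c := by
    rw [pvGet2, List.getD_eq_getElem _ _ hc]
  have e2 : (m'.getD r [])[c] = pvGet2 m' r c := by
    rw [pvGet2, List.getD_eq_getElem _ _ hc']
  rw [e1, e2, hg, hg']

theorem headD_eq_getD (l : List (List String)) : l.headD [] = l.getD 0 [] := by
  cases l <;> rfl

theorem main_equiv (geometry : List (List String)) (h : Pre_parse_from_gui geometry) :
    parse_from_gui geometry = parse_from_gui_alt geometry := by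
  obtain ⟨hne, hrows⟩ := h
  have hrow : ∀ i < geometry.length, (geometry.headD []).length ≤ (geometry.getD i []).length := by
    intro i hi
    have hmem : geometry.getD i [] ∈ geometry := by
      rw [List.getD_eq_getElem _ _ hi]
      exact List.getElem_mem hi
    exact hrows _ hmem
  have h1 := pass1_eqv (g := geometry) hrow
  have h2 := pass2_eqv hrow h1
  have hC2 : (((List.range geometry.length).foldl
        (pass1Row geometry (geometry.headD []).length) geometry).headD []).length
      = (geometry.headD []).length := by
    rw [headD_eq_getD, h1.2.1 0, ← headD_eq_getD]
  have hA : parse_from_gui geometry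
      = (List.range (geometry.headD []).length).foldl (pass2Col geometry geometry.length)
          ((List.range geometry.length).foldl (pass1Row geometry (geometry.headD []).length) geometry) := by
    simp only [parse_from_gui]
    rw [hC2]
  rw [hA]
  exact eq_of_eqv h2 (alt_eqv hrow)

-- ===== VERDICT (by name: the statement is the Claim_ definition above) =====
theorem parse_from_gui_spec : Claim_equal_parse_from_gui := by
  intro geometry _ hpre
  unfold Spec_parse_from_gui
  exact main_equiv geometry hpre
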